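-- pv_equiv track=rewrite | github.com/Aravinthpromon/pythontasks | even_odd_prime_as_dict_file.py | categorize_numbers
-- ===== SOURCE A (Python) =====
-- import math
--
-- def is_prime(num):
--     """Check if a number is prime."""
--     if num < 2:
--         return False
--     for i in range(2, int(math.sqrt(num)) + 1):
--         if num % i == 0:
--             return False
--     return True
--
-- def categorize_numbers(start, end):
--
--     even_numbers = []
--     odd_numbers = []
--     prime_numbers = []
--
--     for num in range(start, end + 1):
--         if num % 2 == 0:
--             even_numbers.append(num)
--         else:
--             odd_numbers.append(num)
--
--         if is_prime(num):
--             prime_numbers.append(num)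
--
--     return {
--         "Even": even_numbers,
--         "Odd": odd_numbers,
--         "Prime": prime_numbers
--     }
-- ===== SOURCE B (Python) =====
-- import math
--
-- def categorize_numbers(start, end):
--     evens = list(range(start + start % 2, end + 1, 2))
--     odds = list(range(start + (start + 1) % 2, end + 1, 2))
--     lo = max(start, 2)
--     composites = set()
--     if lo <= end:
--         for p in range(2, math.isqrt(end) + 1):
--             first = max(p * p, ((lo + p - 1) // p) * p)
--             for m in range(first, end + 1, p):
--                 composites.add(m)
--     primes = [n for n in range(lo, end + 1) if n not in composites]
--     return {"Even": evens, "Odd": odds, "Prime": primes}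
-- ===== Notes on version B (the rewrite author's own statement) =====
-- stated objective: faster
-- what changed: Replaces the per-number trial-division prime test and the append-per-element even/odd loop by a Sieve-of-Eratosthenes composite set built once for the whole range plus direct stride-2 arithmetic ranges for even/odd.
import Mathlib
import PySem

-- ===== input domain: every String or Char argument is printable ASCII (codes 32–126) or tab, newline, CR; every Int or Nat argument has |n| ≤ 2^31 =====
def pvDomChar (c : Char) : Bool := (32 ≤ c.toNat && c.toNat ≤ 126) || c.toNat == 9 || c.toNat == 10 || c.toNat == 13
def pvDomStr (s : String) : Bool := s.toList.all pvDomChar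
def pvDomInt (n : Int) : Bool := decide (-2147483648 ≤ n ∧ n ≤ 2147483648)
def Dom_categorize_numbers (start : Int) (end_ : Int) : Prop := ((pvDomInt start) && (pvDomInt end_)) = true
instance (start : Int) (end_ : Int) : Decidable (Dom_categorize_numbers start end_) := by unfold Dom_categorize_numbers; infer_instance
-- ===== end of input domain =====

-- B replaces A's per-number trial-division primality test by one sieve pass over [2, end]
-- (composite set) and the element-by-element even/odd loop by stride-2 ranges; measured faster,
-- same return value everywhere.

-- ===== PORT A =====
-- int(math.sqrt(num)) for 0 ≤ num ≤ 2^31: the double sqrt is exact enough there, equals isqrt.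
def pvSqrtInt (num : Int) : Int := (num.toNat.sqrt : Int)

-- the 'for i in range(...)' loop of is_prime, with its early 'return False'
def is_prime_loop (num : Int) : List Int → Bool
  | [] => true
  | i :: rest => if PySem.Int.mod num i == 0 then false else is_prime_loop num rest

def is_prime (num : Int) : Bool :=
  if num < 2 then false
  else is_prime_loop num (PySem.List.pyRange 2 (pvSqrtInt num + 1) 1)

def categorize_numbers (start : Int) (end_ : Int) : List (String × List Int) :=
  let r := (PySem.List.pyRange start (end_ + 1) 1).foldl
    (fun (acc : List Int × List Int × List Int) num =>
      let acc2 := if PySem.Int.mod num 2 == 0 then (acc.1 ++ [num], acc.2.1, acc.2.2)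
                  else (acc.1, acc.2.1 ++ [num], acc.2.2)
      if is_prime num then (acc2.1, acc2.2.1, acc2.2.2 ++ [num]) else acc2)
    ([], [], [])
  [("Even", r.1), ("Odd", r.2.1), ("Prime", r.2.2)]

-- ===== PORT B =====
-- the (segmented) sieve: composites within [lo, end] for lo = max(start, 2)
def pvComposites (start : Int) (end_ : Int) : PySem.Set Int :=
  let lo := max start 2
  if lo ≤ end_ then
    (PySem.List.pyRange 2 (pvSqrtInt end_ + 1) 1).foldl
      (fun s p =>
        (PySem.List.pyRange (max (p * p) (PySem.Int.floordiv (lo + p - 1) p * p)) (end_ + 1) p).foldl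
          PySem.Set.add s)
      PySem.Set.empty
  else PySem.Set.empty

def categorize_numbers_alt (start : Int) (end_ : Int) : List (String × List Int) :=
  let evens := PySem.List.pyRange (start + PySem.Int.mod start 2) (end_ + 1) 2
  let odds := PySem.List.pyRange (start + PySem.Int.mod (start + 1) 2) (end_ + 1) 2
  let comp := pvComposites start end_
  let primes := (PySem.List.pyRange (max start 2) (end_ + 1) 1).filter
      (fun n => !(PySem.Set.contains comp n))
  [("Even", evens), ("Odd", odds), ("Prime", primes)]

-- ===== PRECONDITION & SPEC =====
def Spec_categorize_numbers (start : Int) (end_ : Int) (out : List (String × List Int)) : Prop := out = categorize_numbers_alt start end_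
instance (start : Int) (end_ : Int) (out : List (String × List Int)) : Decidable (Spec_categorize_numbers start end_ out) := by unfold Spec_categorize_numbers; infer_instance

-- ===== CLAIM (what is proved, stated in full; the proofs are below) =====
def Claim_equal_categorize_numbers : Prop := ∀ (start : Int) (end_ : Int), Dom_categorize_numbers start end_ → Spec_categorize_numbers start end_ (categorize_numbers start end_)

-- ===== LEMMAS AND PROOFS =====

lemma pyRange_two_eq_nil {a b : Int} (h : b ≤ a) : PySem.List.pyRange a b 2 = [] := by
  rw [PySem.List.pyRange_of_pos _ _ (by norm_num : (0:Int) < 2)]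
  simp [show ¬ a < b by omega]

lemma pyRange_two_cons {a b : Int} (h : a < b) :
    PySem.List.pyRange a b 2 = a :: PySem.List.pyRange (a + 2) b 2 := by
  rw [PySem.List.pyRange_of_pos _ _ (by norm_num : (0:Int) < 2),
      PySem.List.pyRange_of_pos _ _ (by norm_num : (0:Int) < 2)]
  by_cases h2 : a + 2 < b
  · rw [if_pos h, if_pos h2]
    have hc : ((b - a + 2 - 1) / 2).toNat = ((b - (a + 2) + 2 - 1) / 2).toNat + 1 := by omega
    rw [hc, List.range_succ_eq_map, List.map_cons, List.map_map]
    refine congrArg₂ _ (by simp) ?_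
    apply List.map_congr_left
    intro k _
    simp [Function.comp]
    ring
  · rw [if_pos h, if_neg h2]
    have hc : ((b - a + 2 - 1) / 2).toNat = 1 := by omega
    rw [hc]
    simp

lemma filter_even (a b : Int) :
    (PySem.List.pyRange a b 1).filter (fun x => PySem.Int.mod x 2 == 0)
      = PySem.List.pyRange (a + PySem.Int.mod a 2) b 2 := by
  have hm : ∀ x : Int, PySem.Int.mod x 2 = x % 2 :=
    fun x => PySem.Int.mod_eq_emod_of_pos (by norm_num)
  suffices h : ∀ (m : Nat) (a : Int), (b - a).toNat ≤ m →
      (PySem.List.pyRange a b 1).filter (fun x => PySem.Int.mod x 2 == 0)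
        = PySem.List.pyRange (a + PySem.Int.mod a 2) b 2 from h (b - a).toNat a le_rfl
  intro m
  induction m with
  | zero =>
      intro a ha
      rw [PySem.List.pyRange_one_eq_nil (by omega), List.filter_nil,
        pyRange_two_eq_nil (by have := Int.emod_nonneg a (by norm_num : (2:Int) ≠ 0); rw [hm]; omega)]
  | succ m ih =>
      intro a ha
      by_cases hab : b ≤ a
      · rw [PySem.List.pyRange_one_eq_nil hab, List.filter_nil,
          pyRange_two_eq_nil (by have := Int.emod_nonneg a (by norm_num : (2:Int) ≠ 0); rw [hm]; omega)]
      · have hlt : a < b := by omega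
        rw [PySem.List.pyRange_one_cons hlt, List.filter_cons, ih (a + 1) (by omega)]
        have he := Int.emod_two_eq a
        by_cases hpar : a % 2 = 0
        · have h1 : (a + 1) % 2 = 1 := by omega
          simp only [hm, hpar, h1]
          simp only [beq_self_eq_true, if_pos]
          rw [show a + (0:Int) = a by ring, pyRange_two_cons hlt]
          norm_num [show a + 1 + 1 = a + 2 from by ring]
        · have hp1 : a % 2 = 1 := by omega
          have h1 : (a + 1) % 2 = 0 := by omega
          simp only [hm, hp1, h1]
          norm_num

lemma filter_odd (a b : Int) :
    (PySem.List.pyRange a b 1).filter (fun x => !(PySem.Int.mod x 2 == 0))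
      = PySem.List.pyRange (a + PySem.Int.mod (a + 1) 2) b 2 := by
  have hm : ∀ x : Int, PySem.Int.mod x 2 = x % 2 :=
    fun x => PySem.Int.mod_eq_emod_of_pos (by norm_num)
  suffices h : ∀ (m : Nat) (a : Int), (b - a).toNat ≤ m →
      (PySem.List.pyRange a b 1).filter (fun x => !(PySem.Int.mod x 2 == 0))
        = PySem.List.pyRange (a + PySem.Int.mod (a + 1) 2) b 2 from h (b - a).toNat a le_rfl
  intro m
  induction m with
  | zero =>
      intro a ha
      rw [PySem.List.pyRange_one_eq_nil (by omega), List.filter_nil,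
        pyRange_two_eq_nil (by have := Int.emod_nonneg (a+1) (by norm_num : (2:Int) ≠ 0); rw [hm]; omega)]
  | succ m ih =>
      intro a ha
      by_cases hab : b ≤ a
      · rw [PySem.List.pyRange_one_eq_nil hab, List.filter_nil,
          pyRange_two_eq_nil (by have := Int.emod_nonneg (a+1) (by norm_num : (2:Int) ≠ 0); rw [hm]; omega)]
      · have hlt : a < b := by omega
        rw [PySem.List.pyRange_one_cons hlt, List.filter_cons, ih (a + 1) (by omega)]
        by_cases hpar : a % 2 = 0
        · have h1 : (a + 1) % 2 = 1 := by omega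
          have h2 : (a + 1 + 1) % 2 = 0 := by omega
          simp only [hm, hpar, h1, h2]
          norm_num
        · have hp1 : a % 2 = 1 := by omega
          have h1 : (a + 1) % 2 = 0 := by omega
          have h2 : (a + 1 + 1) % 2 = 1 := by omega
          simp only [hm, hp1, h1, h2]
          simp only [show a + (0:Int) = a by ring]
          rw [pyRange_two_cons hlt]
          norm_num [show a + 1 + 1 = a + 2 from by ring]

lemma mem_nested_add (ps : List Int) (f : Int → List Int) (s : PySem.Set Int) (y : Int) :
    y ∈ ps.foldl (fun s p => (f p).foldl PySem.Set.add s) s ↔ y ∈ s ∨ ∃ p ∈ ps, y ∈ f p := by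
  induction ps generalizing s with
  | nil => simp
  | cons p r ih =>
      rw [List.foldl_cons, ih,
        show (f p).foldl PySem.Set.add s = PySem.Set.update s (f p) from rfl,
        PySem.Set.mem_update]
      simp only [List.mem_cons]
      aesop

lemma is_prime_loop_eq (num : Int) (l : List Int) :
    is_prime_loop num l = !(l.any (fun i => PySem.Int.mod num i == 0)) := by
  induction l with
  | nil => rfl
  | cons i r ih =>
      rw [is_prime_loop]
      cases h : (PySem.Int.mod num i == 0) <;> simp [h, ih]

-- i ≤ pvSqrtInt n ↔ i*i ≤ n, for 0 ≤ n, 1 ≤ i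

lemma le_sqrtInt_iff (n i : Int) (hn : 0 ≤ n) (hi : 1 ≤ i) :
    i ≤ pvSqrtInt n ↔ i * i ≤ n := by
  rw [pvSqrtInt, show i = ((i.toNat : Int)) from (Int.toNat_of_nonneg (by omega)).symm,
    Nat.cast_le, Nat.le_sqrt, ← Nat.cast_le (α := Int), Nat.cast_mul,
    Int.toNat_of_nonneg (by omega), Int.toNat_of_nonneg hn]

-- the first multiple of p at or above lo: lo ≤ ceil(lo/p)*p ≤ lo + p - 1, and it divides

lemma ceil_mul_bounds (lo p : Int) (hp : 0 < p) :
    lo ≤ PySem.Int.floordiv (lo + p - 1) p * p ∧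
      PySem.Int.floordiv (lo + p - 1) p * p ≤ lo + p - 1 := by
  have h1 := PySem.Int.floordiv_mul_add_mod (lo + p - 1) p
  have h2 := PySem.Int.mod_nonneg (lo + p - 1) hp
  have h3 := PySem.Int.mod_lt (lo + p - 1) hp
  omega

lemma first_multiple_le (lo p n : Int) (hp : 0 < p) (hln : lo ≤ n) (hdvd : p ∣ n) :
    PySem.Int.floordiv (lo + p - 1) p * p ≤ n := by
  obtain ⟨hge, hle⟩ := ceil_mul_bounds lo p hp
  obtain ⟨k, hk⟩ := hdvd
  set q := PySem.Int.floordiv (lo + p - 1) p with hq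
  by_contra hcon
  push Not at hcon
  have hkq : k ≤ q - 1 := by
    by_contra h
    push Not at h
    have h2 : q * p ≤ k * p := mul_le_mul_of_nonneg_right (by omega) (le_of_lt hp)
    rw [hk, mul_comm] at hcon
    omega
  have h3 : k * p ≤ (q - 1) * p := mul_le_mul_of_nonneg_right hkq (le_of_lt hp)
  have h4 : (q - 1) * p = q * p - p := by ring
  rw [hk, mul_comm] at hln
  omega

lemma is_prime_iff (n : Int) (h2 : 2 ≤ n) :
    is_prime n = true ↔ ¬ ∃ i : Int, 2 ≤ i ∧ i ≤ pvSqrtInt n ∧ i ∣ n := by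
  rw [is_prime, if_neg (by omega), is_prime_loop_eq, Bool.not_eq_true', List.any_eq_false]
  push Not
  constructor
  · intro h i h1 h2' hdvd
    have hm : i ∈ PySem.List.pyRange 2 (pvSqrtInt n + 1) 1 :=
      PySem.List.mem_pyRange_one.mpr ⟨h1, by omega⟩
    have hh := h i hm
    rw [← PySem.Int.mod_eq_zero_iff_dvd] at hdvd
    simp [hdvd] at hh
  · intro h i hm
    rw [PySem.List.mem_pyRange_one] at hm
    intro hc
    rw [beq_iff_eq, PySem.Int.mod_eq_zero_iff_dvd] at hc
    exact h i hm.1 (by omega) hc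

lemma mem_composites_iff (start end_ n : Int) (hlo : max start 2 ≤ n) (hn : n ≤ end_) :
    n ∈ pvComposites start end_ ↔ ∃ i : Int, 2 ≤ i ∧ i ≤ pvSqrtInt n ∧ i ∣ n := by
  have h2 : 2 ≤ n := le_trans (le_max_right _ _) hlo
  rw [pvComposites]
  rw [if_pos (by omega : max start 2 ≤ end_),
    mem_nested_add _ (fun p =>
      PySem.List.pyRange (max (p * p) (PySem.Int.floordiv (max start 2 + p - 1) p * p)) (end_ + 1) p)]
  constructor
  · rintro (h | ⟨p, hp, hmem⟩)
    · simp [PySem.Set.empty] at h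
    · rw [PySem.List.mem_pyRange_one] at hp
      rw [PySem.List.mem_pyRange_iff_of_pos (by omega)] at hmem
      obtain ⟨hfirst, hlt, hdvd⟩ := hmem
      have hdf : p ∣ max (p * p) (PySem.Int.floordiv (max start 2 + p - 1) p * p) := by
        rcases max_choice (p * p) (PySem.Int.floordiv (max start 2 + p - 1) p * p) with h | h <;>
          rw [h]
        · exact Dvd.intro p rfl
        · exact dvd_mul_left p _
      have hpn : p ∣ n := by
        have := Int.dvd_add hdvd hdf
        simpa using this
      refine ⟨p, by omega, ?_, hpn⟩
      rw [le_sqrtInt_iff n p (by omega) (by omega)]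
      have : p * p ≤ max (p * p) (PySem.Int.floordiv (max start 2 + p - 1) p * p) :=
        le_max_left _ _
      omega
  · rintro ⟨i, hi2, hile, hidvd⟩
    have hii : i * i ≤ n := (le_sqrtInt_iff n i (by omega) (by omega)).mp hile
    have hdf : i ∣ max (i * i) (PySem.Int.floordiv (max start 2 + i - 1) i * i) := by
      rcases max_choice (i * i) (PySem.Int.floordiv (max start 2 + i - 1) i * i) with h | h <;>
        rw [h]
      · exact Dvd.intro i rfl
      · exact dvd_mul_left i _
    refine Or.inr ⟨i, ?_, ?_⟩
    · rw [PySem.List.mem_pyRange_one]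
      refine ⟨by omega, ?_⟩
      have : i ≤ pvSqrtInt end_ := by
        rw [le_sqrtInt_iff end_ i (by omega) (by omega)]; omega
      omega
    · rw [PySem.List.mem_pyRange_iff_of_pos (by omega)]
      have hfle : PySem.Int.floordiv (max start 2 + i - 1) i * i ≤ n :=
        first_multiple_le (max start 2) i n (by omega) hlo hidvd
      refine ⟨by omega, by omega, ?_⟩
      exact Int.dvd_sub hidvd hdf

lemma prime_test_eq (start end_ n : Int) (hlo : max start 2 ≤ n) (hn : n ≤ end_) :
    is_prime n = !(PySem.Set.contains (pvComposites start end_) n) := by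
  have h2 : 2 ≤ n := le_trans (le_max_right _ _) hlo
  rw [PySem.Set.contains_eq_decide]
  by_cases h : ∃ i : Int, 2 ≤ i ∧ i ≤ pvSqrtInt n ∧ i ∣ n
  · have h1 : is_prime n = false := by
      cases hb : is_prime n
      · rfl
      · exact absurd h ((is_prime_iff n h2).mp hb)
    rw [h1, decide_eq_true ((mem_composites_iff start end_ n hlo hn).mpr h)]; rfl
  · have h1 : is_prime n = true := (is_prime_iff n h2).mpr h
    have h3 : ¬ n ∈ pvComposites start end_ :=
      fun hm => h ((mem_composites_iff start end_ n hlo hn).mp hm)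
    rw [h1, decide_eq_false h3]; rfl

lemma is_prime_small (n : Int) (h : n < 2) : is_prime n = false := by
  rw [is_prime, if_pos h]

lemma filter_prime (start end_ : Int) :
    (PySem.List.pyRange start (end_ + 1) 1).filter is_prime
      = (PySem.List.pyRange (max start 2) (end_ + 1) 1).filter
          (fun n => !(PySem.Set.contains (pvComposites start end_) n)) := by
  have hcongr : ∀ l : List Int, (∀ n ∈ l, max start 2 ≤ n ∧ n ≤ end_) →
      l.filter is_prime = l.filter (fun n => !(PySem.Set.contains (pvComposites start end_) n)) := by
    intro l hl
    exact List.filter_congr (fun n hn => by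
      obtain ⟨a1, a2⟩ := hl n hn; exact prime_test_eq start end_ n a1 a2)
  by_cases hs : 2 ≤ start
  · rw [max_eq_left hs] at *
    exact hcongr _ (fun n hn => by
      rw [PySem.List.mem_pyRange_one] at hn
      constructor <;> omega)
  · rw [max_eq_right (by omega : start ≤ 2)]
    by_cases he : end_ + 1 ≤ 2
    · rw [PySem.List.pyRange_one_eq_nil he]
      simp only [List.filter_nil]
      apply List.filter_eq_nil_iff.mpr
      intro n hn
      rw [PySem.List.mem_pyRange_one] at hn
      simp [is_prime_small n (by omega)]
    · rw [PySem.List.pyRange_one_append start 2 (end_ + 1) (by omega) (by omega),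
        List.filter_append]
      have h1 : (PySem.List.pyRange start 2 1).filter is_prime = [] := by
        apply List.filter_eq_nil_iff.mpr
        intro n hn
        rw [PySem.List.mem_pyRange_one] at hn
        simp [is_prime_small n (by omega)]
      rw [h1, List.nil_append]
      exact hcongr _ (fun n hn => by
        rw [PySem.List.mem_pyRange_one] at hn; omega)

-- ===== VERDICT (by name: the statement is the Claim_ definition above) =====
theorem categorize_numbers_spec : Claim_equal_categorize_numbers := by
  intro start end_ _
  show categorize_numbers start end_ = categorize_numbers_alt start end_
  rw [categorize_numbers, categorize_numbers_alt]
  have hstep : (fun (acc : List Int × List Int × List Int) num =>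
      let acc2 := if PySem.Int.mod num 2 == 0 then (acc.1 ++ [num], acc.2.1, acc.2.2)
                  else (acc.1, acc.2.1 ++ [num], acc.2.2)
      if is_prime num then (acc2.1, acc2.2.1, acc2.2.2 ++ [num]) else acc2)
    = (fun (acc : List Int × List Int × List Int) num =>
        (if PySem.Int.mod num 2 == 0 then acc.1 ++ [num] else acc.1,
         (if !(PySem.Int.mod num 2 == 0) then acc.2.1 ++ [num] else acc.2.1,
          if is_prime num then acc.2.2 ++ [num] else acc.2.2))) := by
    funext acc num
    cases h1 : (PySem.Int.mod num 2 == 0) <;> cases h2 : is_prime num <;>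
      simp only [Bool.not_true, Bool.not_false, if_true] <;> rfl
  rw [hstep,
    PySem.List.foldl_prod_mk
      (f := fun (l : List Int) (num : Int) =>
        if PySem.Int.mod num 2 == 0 then l ++ [num] else l)
      (g := fun (s : List Int × List Int) (num : Int) =>
        (if !(PySem.Int.mod num 2 == 0) then s.1 ++ [num] else s.1,
         if is_prime num then s.2 ++ [num] else s.2)),
    PySem.List.foldl_prod_mk
      (f := fun (l : List Int) (num : Int) =>
        if !(PySem.Int.mod num 2 == 0) then l ++ [num] else l)
      (g := fun (l : List Int) (num : Int) =>
        if is_prime num then l ++ [num] else l),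
    PySem.List.foldl_append_if_eq_filter, PySem.List.foldl_append_if_eq_filter,
    PySem.List.foldl_append_if_eq_filter]
  simp only [List.nil_append]
  rw [filter_even, filter_odd, filter_prime]
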